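-- pv_equiv track=rewrite | github.com/Erling-Fjelstad/Kattis | aRationalSequenceTake3/main.py | F
-- ===== SOURCE A (Python) =====
-- def F(n):
--     p, q = 1, 1
--     path = []
--
--     while n > 1:
--         if n % 2 == 0:
--             path.append("L")
--         else:
--             path.append("R")
--         n //= 2
--
--     for direction in reversed(path):
--         if direction == "L":
--             q = p + q
--         else:
--             p = p + q
--
--     return f"{p}/{q}"
-- ===== SOURCE B (Python) =====
-- def F(n):
--     def cw(n):
--         if n <= 1:
--             return (1, 1)
--         p, q = cw(n // 2)
--         return (p, p + q) if n % 2 == 0 else (p + q, q)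
--     p, q = cw(n)
--     return f"{p}/{q}"
-- ===== Notes on version B (the rewrite author's own statement) =====
-- stated objective: simpler
-- what changed: Replaces A's two-phase iteration (build an explicit direction stack LSB-first, then replay it reversed with one addition per step) by a single direct structural recursion on the binary representation that returns the (p,q) pair with no intermediate list.
import Mathlib
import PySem

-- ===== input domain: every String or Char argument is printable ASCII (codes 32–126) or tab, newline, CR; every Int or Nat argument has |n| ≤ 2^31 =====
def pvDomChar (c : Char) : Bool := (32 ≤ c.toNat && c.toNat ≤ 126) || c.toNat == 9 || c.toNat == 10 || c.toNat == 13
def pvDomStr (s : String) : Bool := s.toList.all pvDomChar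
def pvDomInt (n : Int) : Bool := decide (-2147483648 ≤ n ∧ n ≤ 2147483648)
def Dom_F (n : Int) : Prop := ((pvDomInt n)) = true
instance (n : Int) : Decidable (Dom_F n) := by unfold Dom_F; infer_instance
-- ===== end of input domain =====

-- ===== PORT A =====
-- B replaces the build-stack-then-replay loop pair by one direct recursion; objective: simpler.
-- while n > 1: append "L"/"R"; n //= 2   (path in LSB-first order)
def pathA (n : Int) : List String :=
  if h : n > 1 then
    (if PySem.Int.mod n 2 == 0 then "L" else "R") :: pathA (PySem.Int.floordiv n 2)
  else []
termination_by n.toNat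
decreasing_by
  rw [PySem.Int.floordiv_eq_ediv_of_pos (by omega : (0:Int) < 2)]
  omega

def stepA (pq : Int × Int) (d : String) : Int × Int :=
  if d == "L" then (pq.1, pq.1 + pq.2) else (pq.1 + pq.2, pq.2)

def F (n : Int) : String :=
  let path := pathA n
  let pq := path.reverse.foldl stepA (1, 1)
  PySem.Int.toStr pq.1 ++ "/" ++ PySem.Int.toStr pq.2

-- ===== PORT B =====
def cwB (n : Int) : Int × Int :=
  if h : n ≤ 1 then (1, 1)
  else
    let pq := cwB (PySem.Int.floordiv n 2)
    if PySem.Int.mod n 2 == 0 then (pq.1, pq.1 + pq.2) else (pq.1 + pq.2, pq.2)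
termination_by n.toNat
decreasing_by
  rw [PySem.Int.floordiv_eq_ediv_of_pos (by omega : (0:Int) < 2)]
  omega

def F_alt (n : Int) : String :=
  let pq := cwB n
  PySem.Int.toStr pq.1 ++ "/" ++ PySem.Int.toStr pq.2

-- ===== PRECONDITION & SPEC =====
def Spec_F (n : Int) (out : String) : Prop := out = F_alt n
instance (n : Int) (out : String) : Decidable (Spec_F n out) := by unfold Spec_F; infer_instance

-- ===== CLAIM (what is proved, stated in full; the proofs are below) =====
def Claim_equal_F : Prop := ∀ (n : Int), Dom_F n → Spec_F n (F n)

-- ===== LEMMAS AND PROOFS =====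
theorem replay_pathA (n : Int) : (pathA n).reverse.foldl stepA (1, 1) = cwB n := by
  induction n using pathA.induct with
  | case1 n h ih =>
    rw [pathA, cwB]
    simp only [h, dif_pos, dif_neg (by omega : ¬ n ≤ 1)]
    rw [List.reverse_cons, List.foldl_append, ih]
    by_cases hm : PySem.Int.mod n 2 == 0 <;> simp [hm, stepA]
  | case2 n h =>
    rw [pathA, cwB]
    simp only [h, dif_neg, dif_pos (by omega : n ≤ 1)]
    simp

-- ===== VERDICT (by name: the statement is the Claim_ definition above) =====
theorem F_spec : Claim_equal_F := by
  intro n _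
  show F n = F_alt n
  simp only [F, F_alt, replay_pathA]
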